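-- pv_equiv track=rewrite | github.com/ccorbi/NGSkit | ngskit/analysis.py | get_pfm
-- ===== SOURCE A (Python) =====
-- def get_pfm(sequences):
--     """Read list of sequence  and return counts position Matrix.
--
--     Parameters
--     ----------
--     sequences : array_like
--        array of list containing the sequence in str format
--
--     Returns
--     -------
--     dict
--        Matrix on a dict format  where the key is the position, for each position the value is other
--        dict with the counts  per amino acid i.e {'A': 44, 'C': 3, }
--
--
--     """
--     matrix = dict()
--     for seq in sequences:
--         for idx,p in enumerate(seq):
--             # logger.debug("%i %s",idx,p)
--             if idx not in matrix:
--                 matrix[idx] = {p:1}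
--             else:
--                 matrix[idx][p] = 1 + matrix[idx].get(p, 0)
--
--     return matrix
-- ===== SOURCE B (Python) =====
-- def get_pfm(sequences):
--     """Position-frequency count matrix, built column by column (transpose-then-count)."""
--     max_len = max((len(seq) for seq in sequences), default=0)
--     matrix = {}
--     for idx in range(max_len):
--         column = [seq[idx] for seq in sequences if idx < len(seq)]
--         matrix[idx] = {p: column.count(p) for p in dict.fromkeys(column)}
--     return matrix
-- ===== Notes on version B (the rewrite author's own statement) =====
-- stated objective: alternative
-- what changed: Replaces A's row-major traversal (for each sequence, bump per-position dict counts incrementally) with a column-major transpose-then-count pass: compute the max length first, then for each position gather that column's characters and tally them with dict.fromkeys/count.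
import Mathlib
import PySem

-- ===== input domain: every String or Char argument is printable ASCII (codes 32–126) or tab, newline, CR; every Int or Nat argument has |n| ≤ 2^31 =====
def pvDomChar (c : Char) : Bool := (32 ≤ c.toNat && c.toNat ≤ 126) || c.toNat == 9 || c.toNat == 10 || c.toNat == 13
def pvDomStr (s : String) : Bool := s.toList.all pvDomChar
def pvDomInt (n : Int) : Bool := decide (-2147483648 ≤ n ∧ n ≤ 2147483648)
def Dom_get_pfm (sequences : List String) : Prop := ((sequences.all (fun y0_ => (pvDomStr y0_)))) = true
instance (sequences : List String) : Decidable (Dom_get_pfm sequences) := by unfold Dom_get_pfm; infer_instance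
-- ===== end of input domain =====

-- B rebuilds the position-frequency matrix column by column (max length first, then tally each
-- column) instead of A's row-major incremental dict bumping; objective: alternative decomposition.

-- ===== PORT A =====
def get_pfm (sequences : List String) : List (Int × List (String × Int)) :=
  let matrix : PySem.Dict Int (PySem.Dict String Int) :=
    sequences.foldl (fun matrix seq =>
      (PySem.List.enumerate seq.toList 0).foldl (fun m ip =>
        match m.get? ip.1 with
        | none => m.insert ip.1 (PySem.Dict.ofList [(String.ofList [ip.2], 1)])
        | some inner =>
            m.insert ip.1 (inner.insert (String.ofList [ip.2])
              (1 + inner.getD (String.ofList [ip.2]) 0))) matrix) PySem.Dict.empty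
  matrix.items.map (fun kv => (kv.1, kv.2.items))

-- ===== PORT B =====
def get_pfm_alt (sequences : List String) : List (Int × List (String × Int)) :=
  let maxLen : Int := PySem.List.maxD (sequences.map (fun seq => PySem.Str.len seq)) (fun x => x) 0
  let matrix : PySem.Dict Int (PySem.Dict String Int) :=
    (PySem.List.pyRange 0 maxLen).foldl (fun matrix idx =>
      let column : List String :=
        (sequences.filter (fun seq => idx < PySem.Str.len seq)).map
          (fun seq => String.ofList [PySem.List.pyGetD seq.toList idx '?'])
      matrix.insert idx
        (PySem.Dict.ofList ((PySem.List.dedup column).map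
          (fun p => (p, (PySem.List.count column p : Int)))))) PySem.Dict.empty
  matrix.items.map (fun kv => (kv.1, kv.2.items))

-- ===== PRECONDITION & SPEC =====
def Spec_get_pfm (sequences : List String) (out : List (Int × List (String × Int))) : Prop := out = get_pfm_alt sequences
instance (sequences : List String) (out : List (Int × List (String × Int))) : Decidable (Spec_get_pfm sequences out) := by unfold Spec_get_pfm; infer_instance

-- ===== CLAIM (what is proved, stated in full; the proofs are below) =====
def Claim_equal_get_pfm : Prop := ∀ (sequences : List String), Dom_get_pfm sequences → Spec_get_pfm sequences (get_pfm sequences)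

-- ===== LEMMAS AND PROOFS =====

-- the maximal sequence length, as a Nat fold
def pvMaxN (sequences : List String) : Nat :=
  sequences.foldl (fun a s => max a s.toList.length) 0

-- the Int keys 0, 1, …, n-1
def pvR (n : Nat) : List Int := List.map (fun k : Nat => (k : Int)) (List.range n)

-- the column of characters at position k (as 1-character strings)
def pvCol (sequences : List String) (k : Nat) : List String :=
  List.map (fun s => String.ofList [s.toList.getD k '?'])
    (sequences.filter (fun s => decide (k < s.toList.length)))

-- the row-major stream of (position, char) pairs A iterates over
def pvL (sequences : List String) : List (Int × Char) :=
  sequences.flatMap (fun s => PySem.List.enumerate s.toList 0)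

-- A's loop body, written as a single Dict.modify
def pvStep (m : PySem.Dict Int (PySem.Dict String Int)) (ip : Int × Char) :
    PySem.Dict Int (PySem.Dict String Int) :=
  m.modify ip.1 PySem.Dict.empty
    (fun inner => inner.insert (String.ofList [ip.2]) (inner.getD (String.ofList [ip.2]) 0 + 1))

lemma pvStep_eq (m : PySem.Dict Int (PySem.Dict String Int)) (ip : Int × Char) :
    (match m.get? ip.1 with
      | none => m.insert ip.1 (PySem.Dict.ofList [(String.ofList [ip.2], 1)])
      | some inner =>
          m.insert ip.1 (inner.insert (String.ofList [ip.2])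
            (1 + inner.getD (String.ofList [ip.2]) 0))) = pvStep m ip := by
  rcases h : m.get? ip.1 with _ | inner
  · simp only [pvStep, PySem.Dict.modify, PySem.Dict.getD_of_get?_eq_none m PySem.Dict.empty h]
    rfl
  · simp only [pvStep, PySem.Dict.modify, PySem.Dict.getD_of_get?_eq_some m PySem.Dict.empty h,
      Int.add_comm]

lemma pvA_fold (sequences : List String) :
    get_pfm sequences = ((pvL sequences).foldl pvStep PySem.Dict.empty).items.map
      (fun kv => (kv.1, kv.2.items)) := by
  unfold get_pfm pvL
  rw [List.foldl_flatMap]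
  rw [show (fun (m : PySem.Dict Int (PySem.Dict String Int)) (ip : Int × Char) =>
      match m.get? ip.1 with
      | none => m.insert ip.1 (PySem.Dict.ofList [(String.ofList [ip.2], 1)])
      | some inner =>
          m.insert ip.1 (inner.insert (String.ofList [ip.2])
            (1 + inner.getD (String.ofList [ip.2]) 0))) = pvStep
    from funext fun m => funext fun ip => pvStep_eq m ip]

lemma pv_getD_foldl_modify {κ ν β : Type} [BEq κ] [LawfulBEq κ] [DecidableEq κ]
    (L : List β) (key : β → κ) (g : β → ν → ν) (d0 : ν) (d : PySem.Dict κ ν) (c : κ) :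
    (L.foldl (fun d q => (PySem.Dict.modify d (key q) d0 (g q))) d).getD c d0 =
      (L.filter (fun q => key q == c)).foldl (fun v q => g q v) (d.getD c d0) := by
  induction L generalizing d with
  | nil => rfl
  | cons q t ih =>
      simp only [List.foldl_cons, List.filter_cons]
      rw [ih]
      by_cases hq : key q = c
      · simp [hq, PySem.Dict.getD_modify]
      · simp [hq, PySem.Dict.getD_modify, Ne.symm hq]

lemma pv_mem_R (n : Nat) (i : Int) : i ∈ pvR n ↔ 0 ≤ i ∧ i < n := by
  unfold pvR
  rw [List.mem_map]
  constructor
  · rintro ⟨k, hk, rfl⟩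
    rw [List.mem_range] at hk
    omega
  · rintro ⟨h0, hn⟩
    refine ⟨i.toNat, ?_, by omega⟩
    rw [List.mem_range]
    omega

lemma pv_nodup_R (n : Nat) : (pvR n).Nodup := by
  unfold pvR
  exact (List.nodup_range).map (fun a b => by omega)

lemma pv_maxN_append (sequences : List String) (s : String) :
    pvMaxN (sequences ++ [s]) = max (pvMaxN sequences) s.toList.length := by
  simp [pvMaxN]

lemma pv_update_R (n m : Nat) : PySem.Set.update (pvR n) (pvR m) = pvR (max n m) := by
  induction m with
  | zero => simp [pvR, PySem.Set.update]
  | succ m ih =>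
      have h1 : pvR (m + 1) = pvR m ++ [(m : Int)] := by simp [pvR, List.range_succ]
      rw [h1, PySem.Set.update, List.foldl_append]
      rw [show (List.foldl PySem.Set.add (pvR n) (pvR m)) = PySem.Set.update (pvR n) (pvR m) from rfl, ih]
      simp only [List.foldl_cons, List.foldl_nil, PySem.Set.add, PySem.Set.contains]
      by_cases h : m < n
      · have hc : (pvR (max n m)).contains ((m : Int)) = true := by
          rw [List.contains_iff_mem, pv_mem_R]; omega
        simp only [hc, if_true, show max n (m+1) = max n m by omega]
      · have hc : (pvR (max n m)).contains ((m : Int)) = false := by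
          rw [Bool.eq_false_iff, Ne, List.contains_iff_mem, pv_mem_R]; omega
        simp only [hc, Bool.false_eq_true, if_false]
        rw [show max n (m+1) = (max n m) + 1 by omega]
        simp [pvR, List.range_succ]
        omega

lemma pv_ofList_flatMap (sequences : List String) :
    PySem.Set.ofList (sequences.flatMap (fun s => pvR s.toList.length)) = pvR (pvMaxN sequences) := by
  induction sequences using List.reverseRecOn with
  | nil => rfl
  | append_singleton t s ih =>
      rw [List.flatMap_append, PySem.Set.ofList, List.foldl_append,
        show (List.foldl PySem.Set.add PySem.Set.empty (t.flatMap (fun s => pvR s.toList.length)))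
          = PySem.Set.ofList (t.flatMap (fun s => pvR s.toList.length)) from rfl, ih]
      rw [show List.flatMap (fun s => pvR s.toList.length) [s] = pvR s.toList.length by simp]
      rw [show (List.foldl PySem.Set.add (pvR (pvMaxN t)) (pvR s.toList.length))
          = PySem.Set.update (pvR (pvMaxN t)) (pvR s.toList.length) from rfl]
      rw [pv_update_R, pv_maxN_append]

lemma pv_keys (sequences : List String) :
    ((pvL sequences).foldl pvStep PySem.Dict.empty).keys = pvR (pvMaxN sequences) := by
  unfold pvStep
  rw [PySem.Dict.keys_foldl_modify_key (pvL sequences) (fun ip => ip.1) PySem.Dict.empty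
        (fun _ ip => fun inner => inner.insert (String.ofList [ip.2]) (inner.getD (String.ofList [ip.2]) 0 + 1))
        PySem.Dict.empty]
  rw [show (PySem.Dict.empty : PySem.Dict Int (PySem.Dict String Int)).keys = [] from rfl,
    PySem.Set.update_nil_left]
  unfold pvL
  rw [List.map_flatMap]
  rw [show (fun s : String => List.map (fun x : Int × Char => x.1) (PySem.List.enumerate s.toList 0))
      = fun s : String => pvR s.toList.length by
    funext s
    rw [PySem.List.map_fst_enumerate, zero_add, PySem.List.pyRange_zero_nat]
    rfl]
  exact pv_ofList_flatMap sequences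

lemma pv_filter_enumerate (cs : List Char) (s0 i : Int) :
    (PySem.List.enumerate cs s0).filter (fun q => q.1 == i) =
      if s0 ≤ i ∧ i < s0 + cs.length then [(i, cs.getD (i - s0).toNat '?')] else [] := by
  induction cs generalizing s0 with
  | nil =>
      rw [PySem.List.enumerate_nil, List.filter_nil,
        if_neg (by simp only [List.length_nil, Nat.cast_zero]; omega)]
  | cons c t ih =>
      rw [PySem.List.enumerate_cons, List.filter_cons, ih (s0+1)]
      by_cases h0 : s0 = i
      · subst h0
        have h1 : ¬ (s0 + 1 ≤ s0 ∧ s0 < s0 + 1 + (t.length:Int)) := by omega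
        rw [if_neg h1]
        have he : ((s0, c).1 == s0) = true := by simp
        rw [he, if_pos rfl, if_pos (by simp only [List.length_cons]; push_cast; omega)]
        simp only [show (s0 - s0).toNat = 0 by omega, List.getD_cons_zero]
      · have he : ((s0, c).1 == i) = false := by simp; omega
        rw [he]
        simp only [Bool.false_eq_true, if_false]
        by_cases h2 : s0 ≤ i ∧ i < s0 + ((c :: t).length : Int)
        · have h3 : s0 + 1 ≤ i ∧ i < s0 + 1 + (t.length : Int) := by
            obtain ⟨ha, hb⟩ := h2
            simp only [List.length_cons] at hb
            constructor <;> omega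
          rw [if_pos h3, if_pos h2]
          have h4 : (i - s0).toNat = (i - (s0+1)).toNat + 1 := by omega
          simp [h4]
        · have h3 : ¬ (s0 + 1 ≤ i ∧ i < s0 + 1 + (t.length : Int)) := by
            simp only [List.length_cons] at h2
            push_cast at h2 ⊢
            omega
          rw [if_neg h3, if_neg h2]

lemma pv_flatMap_ite {α β : Type} (l : List α) (p : α → Prop) [DecidablePred p] (f : α → β) :
    l.flatMap (fun x => if p x then [f x] else []) = (l.filter (fun x => decide (p x))).map f := by
  induction l with
  | nil => rfl
  | cons x t ih =>
      by_cases h : p x <;> simp [h, ih]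

lemma pv_column (sequences : List String) (k : Nat) :
    ((pvL sequences).filter (fun q => q.1 == (k : Int))).map (fun q => String.ofList [q.2]) =
      pvCol sequences k := by
  unfold pvL
  rw [List.filter_flatMap, List.map_flatMap]
  rw [show (fun s : String => List.map (fun q : Int × Char => String.ofList [q.2])
        (List.filter (fun q => q.1 == (k : Int)) (PySem.List.enumerate s.toList 0)))
      = fun s : String => if (k : Nat) < s.toList.length
          then [String.ofList [s.toList.getD k '?']] else [] by
    funext s
    rw [pv_filter_enumerate s.toList 0 (k : Int)]
    by_cases h : (k : Nat) < s.toList.length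
    · rw [if_pos (by push_cast; omega), if_pos h]
      simp [show ((k : Int) - 0).toNat = k by omega]
    · rw [if_neg (by push_cast; omega), if_neg h]
      rfl]
  rw [pv_flatMap_ite sequences (fun s => (k : Nat) < s.toList.length)
        (fun s => String.ofList [s.toList.getD k '?'])]
  rfl

lemma pv_getD_key (sequences : List String) (k : Nat) :
    ((pvL sequences).foldl pvStep PySem.Dict.empty).getD (k : Int) PySem.Dict.empty =
      PySem.Dict.counter (pvCol sequences k) := by
  unfold pvStep
  refine (pv_getD_foldl_modify (ν := PySem.Dict String Int) (pvL sequences) (fun ip => ip.1)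
    (fun ip => fun inner => inner.insert (String.ofList [ip.2]) (inner.getD (String.ofList [ip.2]) 0 + 1))
    PySem.Dict.empty PySem.Dict.empty ((k : Nat) : Int)).trans ?_
  rw [show (PySem.Dict.empty : PySem.Dict Int (PySem.Dict String Int)).getD ((k : Nat) : Int) PySem.Dict.empty
      = PySem.Dict.empty from rfl]
  rw [show List.foldl (fun (v : PySem.Dict String Int) (q : Int × Char) =>
        v.insert (String.ofList [q.2]) (v.getD (String.ofList [q.2]) 0 + 1)) PySem.Dict.empty
        (List.filter (fun q => q.1 == (k : Int)) (pvL sequences))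
      = List.foldl (fun (d : PySem.Dict String Int) x => d.insert x (d.getD x 0 + 1)) PySem.Dict.empty
        (List.map (fun ip : Int × Char => String.ofList [ip.2])
          (List.filter (fun q => q.1 == (k : Int)) (pvL sequences)))
    from (List.foldl_map (f := fun ip : Int × Char => String.ofList [ip.2])
      (g := fun (d : PySem.Dict String Int) x => d.insert x (d.getD x 0 + 1))).symm]
  rw [pv_column sequences k]
  exact PySem.Dict.foldl_insert_getD_add_one_eq_counter (pvCol sequences k)

lemma pv_nodup_keys (sequences : List String) :
    ((pvL sequences).foldl pvStep PySem.Dict.empty).keys.Nodup := by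
  unfold pvStep
  exact PySem.Dict.nodup_keys_foldl_modify_key (pvL sequences) (fun ip => ip.1) PySem.Dict.empty
    (fun _ ip => fun inner => inner.insert (String.ofList [ip.2]) (inner.getD (String.ofList [ip.2]) 0 + 1))
    PySem.Dict.empty (by simp [PySem.Dict.keys_empty])

lemma pvA_closed (sequences : List String) :
    get_pfm sequences = List.map
      (fun i => (i, (PySem.Dict.counter (pvCol sequences i.toNat)).items)) (pvR (pvMaxN sequences)) := by
  rw [pvA_fold]
  rw [PySem.Dict.items_eq_map_keys _ (pv_nodup_keys sequences) PySem.Dict.empty]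
  rw [pv_keys, List.map_map]
  apply List.map_congr_left
  intro i hi
  have h0 : 0 ≤ i := ((pv_mem_R _ i).mp hi).1
  have hik : i = ((i.toNat : Nat) : Int) := by omega
  simp only [Function.comp]
  rw [hik, pv_getD_key sequences i.toNat]
  simp only [Int.toNat_natCast]

lemma pv_foldl_max_cast (l : List Nat) (a : Nat) :
    List.foldl max (a : Int) (List.map (fun n : Nat => (n : Int)) l) = ((l.foldl max a : Nat) : Int) := by
  induction l generalizing a with
  | nil => rfl
  | cons x t ih =>
      rw [List.map_cons, List.foldl_cons, List.foldl_cons, ← Nat.cast_max, ih]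

lemma pv_maxD (sequences : List String) :
    PySem.List.maxD (sequences.map (fun seq => PySem.Str.len seq)) (fun x => x) 0 =
      (pvMaxN sequences : Int) := by
  cases sequences with
  | nil => rfl
  | cons s t =>
      rw [List.map_cons, PySem.List.maxD, PySem.List.max?_id_cons, Option.getD_some]
      rw [show List.map (fun seq => PySem.Str.len seq) t
          = List.map (fun n : Nat => (n : Int)) (List.map (fun s => s.toList.length) t) by
        rw [List.map_map]; exact List.map_congr_left (fun x _ => PySem.Str.len_eq x)]
      rw [PySem.Str.len_eq, pv_foldl_max_cast]
      unfold pvMaxN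
      rw [List.foldl_cons, List.foldl_map]
      norm_num

-- B's column expression at Int index idx, as written in the port
def pvColB (sequences : List String) (idx : Int) : List String :=
  List.map (fun seq => String.ofList [PySem.List.pyGetD seq.toList idx '?'])
    (List.filter (fun seq => decide (idx < PySem.Str.len seq)) sequences)

lemma pv_colB (sequences : List String) (k : Nat) :
    pvColB sequences ((k : Nat) : Int) = pvCol sequences k := by
  unfold pvColB pvCol
  have hf : List.filter (fun seq => decide (((k : Nat) : Int) < PySem.Str.len seq)) sequences
      = List.filter (fun s => decide (k < s.toList.length)) sequences :=
    List.filter_congr (fun s _ => by simp only [PySem.Str.len_eq, decide_eq_decide, Nat.cast_lt])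
  rw [hf]
  apply List.map_congr_left
  intro s _
  rw [PySem.List.pyGetD_natCast]

lemma pv_items_ofList (col : List String) :
    (PySem.Dict.ofList ((PySem.List.dedup col).map
        (fun p => (p, (PySem.List.count col p : Int))))).items =
      (PySem.Dict.counter col).items := by
  rw [show PySem.Dict.ofList ((PySem.List.dedup col).map
        (fun p => (p, (PySem.List.count col p : Int))))
      = List.foldl (fun (acc : PySem.Dict String Int) p => acc.insert p.1 p.2) PySem.Dict.empty
        ((PySem.List.dedup col).map (fun p => (p, (PySem.List.count col p : Int)))) from rfl]
  rw [PySem.Dict.items_foldl_insert_fresh _ Prod.fst Prod.snd PySem.Dict.empty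
        (fun a _ => PySem.Dict.contains_empty a.1)
        (by
          have h1 : List.map Prod.fst (List.map
              (fun p => (p, (PySem.List.count col p : Int))) (PySem.List.dedup col))
              = PySem.List.dedup col := by
            rw [List.map_map]
            exact (List.map_congr_left (fun a _ => rfl)).trans (List.map_id _)
          rw [h1]
          exact PySem.List.nodup_dedup col)]
  rw [PySem.Dict.items_counter]
  simp [Function.comp, PySem.List.count_eq,
    show (PySem.Dict.empty : PySem.Dict String Int).items = [] from rfl]

lemma pvB_closed (sequences : List String) :
    get_pfm_alt sequences = List.map
      (fun i => (i, (PySem.Dict.counter (pvCol sequences i.toNat)).items)) (pvR (pvMaxN sequences)) := by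
  unfold get_pfm_alt
  simp only []
  rw [pv_maxD, PySem.List.pyRange_zero_nat]
  rw [show (fun (matrix : PySem.Dict Int (PySem.Dict String Int)) (idx : Int) =>
        matrix.insert idx
          (PySem.Dict.ofList
            (List.map
              (fun p =>
                (p,
                  ((PySem.List.count
                      (List.map (fun seq => String.ofList [PySem.List.pyGetD seq.toList idx '?'])
                        (List.filter (fun seq => decide (idx < PySem.Str.len seq)) sequences))
                      p : Nat) : Int)))
              (PySem.List.dedup
                (List.map (fun seq => String.ofList [PySem.List.pyGetD seq.toList idx '?'])
                  (List.filter (fun seq => decide (idx < PySem.Str.len seq)) sequences))))))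
      = (fun (matrix : PySem.Dict Int (PySem.Dict String Int)) (idx : Int) =>
          matrix.insert idx
            (PySem.Dict.ofList ((PySem.List.dedup (pvColB sequences idx)).map
              (fun p => (p, (PySem.List.count (pvColB sequences idx) p : Int))))))
    from rfl]
  rw [show List.map (fun k : Nat => (k : Int)) (List.range (pvMaxN sequences))
      = pvR (pvMaxN sequences) from rfl]
  rw [PySem.Dict.items_foldl_insert_fresh (pvR (pvMaxN sequences)) (fun idx : Int => idx)
        (fun idx => PySem.Dict.ofList ((PySem.List.dedup (pvColB sequences idx)).map
          (fun p => (p, (PySem.List.count (pvColB sequences idx) p : Int)))))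
        PySem.Dict.empty
        (fun a _ => PySem.Dict.contains_empty a)
        (by simpa using pv_nodup_R (pvMaxN sequences))]
  rw [show (PySem.Dict.empty : PySem.Dict Int (PySem.Dict String Int)).items = [] from rfl,
    List.nil_append, List.map_map]
  apply List.map_congr_left
  intro i hi
  have h0 : 0 ≤ i := ((pv_mem_R _ i).mp hi).1
  have hik : i = ((i.toNat : Nat) : Int) := by omega
  simp only [Function.comp]
  rw [hik, pv_colB sequences i.toNat, pv_items_ofList, Int.toNat_natCast]

-- ===== VERDICT (by name: the statement is the Claim_ definition above) =====
theorem get_pfm_spec : Claim_equal_get_pfm := by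
  intro sequences _
  unfold Spec_get_pfm
  rw [pvA_closed, pvB_closed]
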